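-- pv_equiv track=rewrite | github.com/JuliannaMali/pp1 | 12-Test3/mock2/p7.py | f
-- ===== SOURCE A (Python) =====
-- def f(d):
--     parking = []
--
--     for cars in d:
--         for car in cars:
--             if car != "in" and car != "out":
--                 if car in parking:
--                     parking.remove(car)
--                 else:
--                     parking.append(car)
--
--     parking.sort()
--     return parking
-- ===== SOURCE B (Python) =====
-- def f(d):
--     counts = {}
--     for cars in d:
--         for car in cars:
--             if car != "in" and car != "out":
--                 counts[car] = counts.get(car, 0) + 1
--     return sorted(car for car, n in counts.items() if n % 2 == 1)
-- ===== Notes on version B (the rewrite author's own statement) =====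
-- stated objective: faster
-- what changed: Replaces the live append/remove toggle list (with its repeated linear membership scans and removals) by a single frequency-dict build followed by a parity filter: a car is present iff it was seen an odd number of times.
import Mathlib
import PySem

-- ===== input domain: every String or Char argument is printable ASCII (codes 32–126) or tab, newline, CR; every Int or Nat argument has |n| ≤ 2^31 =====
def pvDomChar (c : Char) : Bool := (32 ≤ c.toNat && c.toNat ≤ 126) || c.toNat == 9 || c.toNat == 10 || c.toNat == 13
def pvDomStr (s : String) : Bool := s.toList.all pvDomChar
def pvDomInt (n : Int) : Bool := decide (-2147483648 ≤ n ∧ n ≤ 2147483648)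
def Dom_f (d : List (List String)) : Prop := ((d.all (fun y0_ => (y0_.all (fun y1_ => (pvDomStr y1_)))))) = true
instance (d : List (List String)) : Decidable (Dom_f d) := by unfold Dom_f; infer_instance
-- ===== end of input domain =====

-- B replaces A's live toggle list (repeated linear membership scans / removals) by one
-- frequency-dict pass followed by an odd-parity filter; same sorted result.

-- ===== PORT A =====
-- parking.remove(car) is only reached when 'car in parking' holds (exact there:
-- both remove the first occurrence; List.erase is that removal).
def f (d : List (List String)) : List String :=
  PySem.List.sorted
    (d.foldl (fun parking cars =>
      cars.foldl (fun parking car =>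
        if car ≠ "in" ∧ car ≠ "out" then
          if car ∈ parking then parking.erase car else parking ++ [car]
        else parking) parking) [])
    (fun x => x) false

-- ===== PORT B =====
def f_alt (d : List (List String)) : List String :=
  PySem.List.sorted
    (((d.foldl (fun counts cars =>
        cars.foldl (fun (counts : PySem.Dict String Int) car =>
          if car ≠ "in" ∧ car ≠ "out" then counts.insert car (counts.getD car 0 + 1)
          else counts) counts) PySem.Dict.empty).items.filter
        (fun p => PySem.Int.mod p.2 2 == 1)).map Prod.fst)
    (fun x => x) false

-- ===== PRECONDITION & SPEC =====
def Spec_f (d : List (List String)) (out : List String) : Prop := out = f_alt d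
instance (d : List (List String)) (out : List String) : Decidable (Spec_f d out) := by unfold Spec_f; infer_instance

-- ===== CLAIM (what is proved, stated in full; the proofs are below) =====
def Claim_equal_f : Prop := ∀ (d : List (List String)), Dom_f d → Spec_f d (f d)

-- ===== LEMMAS AND PROOFS =====

-- A's toggle step on the parking list
def pvToggle (p : List String) (car : String) : List String :=
  if car ∈ p then p.erase car else p ++ [car]

lemma pvToggle_nodup {p : List String} (h : p.Nodup) (a : String) : (pvToggle p a).Nodup := by
  unfold pvToggle
  split_ifs with ha
  · exact h.erase a
  · rw [List.nodup_append]
    refine ⟨h, List.nodup_singleton a, ?_⟩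
    intro b hb c hc
    rw [List.mem_singleton] at hc
    subst hc
    exact fun hba => ha (hba ▸ hb)

lemma pvToggle_mem {p : List String} (h : p.Nodup) (a x : String) :
    x ∈ pvToggle p a ↔ Xor' (x ∈ p) (x = a) := by
  unfold pvToggle Xor'
  split_ifs with ha
  · rw [h.mem_erase_iff]
    by_cases hxa : x = a <;> subst_eqs <;> simp_all
  · by_cases hxa : x = a <;> subst_eqs <;> simp_all

-- invariant of A's loop: the parking list stays duplicate-free and membership is
-- "initial membership XOR the token was seen an odd number of times"
lemma pvToggle_fold (ts : List String) :
    ∀ p : List String, p.Nodup →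
      (ts.foldl pvToggle p).Nodup ∧
      ∀ x, x ∈ ts.foldl pvToggle p ↔ Xor' (x ∈ p) (ts.count x % 2 = 1) := by
  induction ts with
  | nil => intro p hp; exact ⟨hp, fun x => by simp [Xor']⟩
  | cons a rest ih =>
    intro p hp
    obtain ⟨hnd, hmem⟩ := ih (pvToggle p a) (pvToggle_nodup hp a)
    refine ⟨by simpa using hnd, fun x => ?_⟩
    rw [List.foldl_cons, hmem x, pvToggle_mem hp a x, List.count_cons]
    by_cases hxa : x = a
    · subst hxa
      by_cases hxp : x ∈ p
      · simp [hxp, Xor']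
        omega
      · simp [hxp, Xor']
        omega
    · by_cases hxp : x ∈ p <;> simp [hxp, hxa, Ne.symm hxa, Xor']

-- the odd-parity Bool test on a cast count
lemma pvOddCast (c : Nat) :
    ((PySem.Int.mod (c : Int) 2 == (1 : Int))) = decide (c % 2 = 1) := by
  have h : (2 : Int) = ((2 : Nat) : Int) := rfl
  rw [h, PySem.Int.mod_natCast]
  rcases Nat.mod_two_eq_zero_or_one c with hc | hc <;> simp [hc]

theorem f_spec_aux (d : List (List String)) : f d = f_alt d := by
  unfold f f_alt
  rw [← List.foldl_flatten, ← List.foldl_flatten,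
    PySem.List.foldl_ite_eq_foldl_filter, PySem.List.foldl_ite_eq_foldl_filter,
    PySem.Dict.foldl_insert_getD_add_one_eq_counter]
  set ts : List String :=
    d.flatten.filter (fun c => decide (c ≠ "in" ∧ c ≠ "out")) with hts
  -- B's pre-sort list, characterised
  rw [PySem.Dict.items_counter, List.filter_map, List.map_map]
  have hBlist :
      ((PySem.Set.ofList ts).filter
        ((fun p : String × Int => PySem.Int.mod p.2 2 == 1) ∘ fun k => (k, (ts.count k : Int)))).map
        (Prod.fst ∘ fun k => (k, (ts.count k : Int)))
      = (PySem.Set.ofList ts).filter (fun k => decide (ts.count k % 2 = 1)) := by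
    rw [show (Prod.fst ∘ fun k : String => (k, (ts.count k : Int))) = id by funext k; rfl,
      List.map_id]
    apply List.filter_congr
    intro k _
    simpa using pvOddCast (ts.count k)
  rw [hBlist]
  -- both pre-sort lists are Nodup with the same members, hence a permutation
  obtain ⟨hndA, hmemA⟩ := pvToggle_fold ts [] List.nodup_nil
  have hfold : ts.foldl
      (fun parking car => if car ∈ parking then parking.erase car else parking ++ [car]) []
      = ts.foldl pvToggle [] := rfl
  rw [hfold]
  have hndB : ((PySem.Set.ofList ts).filter (fun k => decide (ts.count k % 2 = 1))).Nodup :=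
    (PySem.Set.nodup_ofList ts).filter _
  apply PySem.List.sorted_eq_sorted_of_perm _ _ _ (fun a b h => h)
  rw [List.perm_ext_iff_of_nodup hndA hndB]
  intro x
  rw [hmemA x]
  simp only [List.mem_filter, PySem.Set.mem_ofList, decide_eq_true_eq, Xor']
  constructor
  · rintro (⟨hf, _⟩ | ⟨hodd, _⟩)
    · simp at hf
    · have : 0 < ts.count x := by omega
      exact ⟨List.count_pos_iff.mp this, by omega⟩
  · rintro ⟨hx, hodd⟩
    exact Or.inr ⟨hodd, by simp⟩

-- ===== VERDICT (by name: the statement is the Claim_ definition above) =====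
theorem f_spec : Claim_equal_f := by
  intro d _
  unfold Spec_f
  exact f_spec_aux d
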